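-- pv_equiv track=rewrite | github.com/AgustinMadygraf/skills | 1b-project-structure-repair/scripts/structure_repair.py | extract_import_blocks
-- ===== SOURCE A (Python) =====
-- def is_multiline_import_start(line: str) -> bool:
--     """Detecta si una línea es el inicio de un import multilinea."""
--     stripped = line.strip()
--     if not (stripped.startswith("import ") or stripped.startswith("from ")):
--         return False
--     return stripped.endswith("(") or ("(" in stripped and ")" not in stripped)
--
-- def extract_import_blocks(lines: list[str], start_idx: int) -> tuple[list[tuple[int, str]], int]:
--     """Extrae bloques de imports, separando multilinea de unilinea."""
--     blocks: list[tuple[int, str]] = []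
--     i = start_idx
--
--     while i < len(lines):
--         line = lines[i]
--         stripped = line.strip()
--
--         if stripped == "":
--             i += 1
--             continue
--         if stripped.startswith("#"):
--             blocks.append((i, line))
--             i += 1
--             continue
--         if not (stripped.startswith("import ") or stripped.startswith("from ")):
--             break
--
--         if is_multiline_import_start(line):
--             multiline_block = [line]
--             i += 1
--             while i < len(lines):
--                 multiline_block.append(lines[i])
--                 if ")" in lines[i]:
--                     i += 1
--                     break
--                 i += 1
--             blocks.append((i - len(multiline_block), "\n".join(multiline_block)))
--         else:
--             blocks.append((i, line))
--             i += 1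
--
--     return blocks, i
-- ===== SOURCE B (Python) =====
-- def extract_import_blocks(lines: list[str], start_idx: int) -> tuple[list[tuple[int, str]], int]:
--     """Extrae bloques de imports: una pasada plana con una bandera de multilinea."""
--     blocks: list[tuple[int, str]] = []
--     i = start_idx
--     in_multiline = False
--     buffer: list[str] = []
--     block_start = 0
--     while i < len(lines):
--         line = lines[i]
--         if in_multiline:
--             buffer.append(line)
--             i += 1
--             if ")" in line:
--                 blocks.append((block_start, "\n".join(buffer)))
--                 in_multiline = False
--                 buffer = []
--                 block_start = 0
--             continue
--         stripped = line.strip()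
--         if stripped == "":
--             i += 1
--         elif stripped.startswith("#"):
--             blocks.append((i, line))
--             i += 1
--         elif not (stripped.startswith("import ") or stripped.startswith("from ")):
--             break
--         elif (stripped.endswith("(") or ("(" in stripped and ")" not in stripped)):
--             in_multiline = True
--             buffer = [line]
--             block_start = i
--             i += 1
--         else:
--             blocks.append((i, line))
--             i += 1
--     if in_multiline:
--         blocks.append((block_start, "\n".join(buffer)))
--     return blocks, i
-- ===== Notes on version B (the rewrite author's own statement) =====
-- stated objective: alternative
-- what changed: Replaces A's nested inner while-loop for multiline imports by a single flat loop over i that carries an in_multiline flag, a line buffer and the block's start index, emitting an unterminated block after the loop.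
import Mathlib
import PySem

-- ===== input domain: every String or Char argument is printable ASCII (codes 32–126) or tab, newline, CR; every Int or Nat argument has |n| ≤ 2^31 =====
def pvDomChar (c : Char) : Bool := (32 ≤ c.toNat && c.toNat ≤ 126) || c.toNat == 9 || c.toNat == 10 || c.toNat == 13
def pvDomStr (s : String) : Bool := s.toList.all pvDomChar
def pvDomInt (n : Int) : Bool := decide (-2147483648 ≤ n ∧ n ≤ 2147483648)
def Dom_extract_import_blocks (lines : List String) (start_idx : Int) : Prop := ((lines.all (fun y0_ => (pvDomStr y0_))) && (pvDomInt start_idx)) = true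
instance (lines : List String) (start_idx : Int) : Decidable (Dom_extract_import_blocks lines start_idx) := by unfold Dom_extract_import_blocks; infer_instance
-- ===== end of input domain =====

-- B replaces A's nested inner while-loop by ONE flat loop over i carrying an `in_multiline`
-- flag, a buffer and the block's start index (same O(n) cost; objective: alternative decomposition).

-- ===== PORT A =====

-- lines[i] under Pre_ (−len ≤ i < len): always in range, so the default is never taken
def pvGet (lines : List String) (i : Int) : String := (PySem.List.pyGet? lines i).getD ""

def is_multiline_import_start (line : String) : Bool :=
  let stripped := PySem.Str.strip line
  if !(PySem.Str.startswith stripped "import " || PySem.Str.startswith stripped "from ") then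
    false
  else
    PySem.Str.endswith stripped "(" ||
      (PySem.Str.isIn "(" stripped && !PySem.Str.isIn ")" stripped)

-- A's inner `while i < len(lines)` collecting the multiline block; fuel makes the
-- while-loop structurally recursive (fuel = remaining iterations, always sufficient at entry)
def pvInnerA (lines : List String) (fuel : Nat) (i : Int) (acc : List String) :
    List String × Int :=
  match fuel with
  | 0 => (acc, i)
  | f + 1 =>
    if i < (lines.length : Int) then
      let acc' := acc ++ [pvGet lines i]
      if PySem.Str.isIn ")" (pvGet lines i) then (acc', i + 1)
      else pvInnerA lines f (i + 1) acc'
    else (acc, i)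

-- A's outer while-loop
def pvOuterA (lines : List String) (fuel : Nat) (i : Int) (blocks : List (Int × String)) :
    List (Int × String) × Int :=
  match fuel with
  | 0 => (blocks, i)
  | f + 1 =>
    if i < (lines.length : Int) then
      let line := pvGet lines i
      let stripped := PySem.Str.strip line
      if stripped = "" then pvOuterA lines f (i + 1) blocks
      else if PySem.Str.startswith stripped "#" then
        pvOuterA lines f (i + 1) (blocks ++ [(i, line)])
      else if !(PySem.Str.startswith stripped "import " || PySem.Str.startswith stripped "from ") then
        (blocks, i)
      else if is_multiline_import_start line then
        let r := pvInnerA lines f (i + 1) [line]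
        pvOuterA lines f r.2 (blocks ++ [(r.2 - (r.1.length : Int), PySem.Str.join "\n" r.1)])
      else pvOuterA lines f (i + 1) (blocks ++ [(i, line)])
    else (blocks, i)

def extract_import_blocks (lines : List String) (start_idx : Int) : (List (Int × String)) × Int :=
  pvOuterA lines ((lines.length : Int) - start_idx).toNat start_idx []

-- ===== PORT B =====

-- B's single flat while-loop with in_multiline / buffer / block_start state
-- (fuel = remaining iterations; at fuel 0 the loop is past its last line, so the
--  trailing `if in_multiline` of Source B is evaluated there and in the else branch)
def pvLoopB (lines : List String) (fuel : Nat) (i : Int) (inml : Bool) (buf : List String)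
    (bstart : Int) (blocks : List (Int × String)) : List (Int × String) × Int :=
  match fuel with
  | 0 => if inml then (blocks ++ [(bstart, PySem.Str.join "\n" buf)], i) else (blocks, i)
  | f + 1 =>
    if i < (lines.length : Int) then
      let line := pvGet lines i
      if inml then
        let buf' := buf ++ [line]
        if PySem.Str.isIn ")" line then
          pvLoopB lines f (i + 1) false [] 0 (blocks ++ [(bstart, PySem.Str.join "\n" buf')])
        else pvLoopB lines f (i + 1) true buf' bstart blocks
      else
        let stripped := PySem.Str.strip line
        if stripped = "" then pvLoopB lines f (i + 1) false buf bstart blocks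
        else if PySem.Str.startswith stripped "#" then
          pvLoopB lines f (i + 1) false buf bstart (blocks ++ [(i, line)])
        else if !(PySem.Str.startswith stripped "import " || PySem.Str.startswith stripped "from ") then
          (blocks, i)
        else if PySem.Str.endswith stripped "(" ||
            (PySem.Str.isIn "(" stripped && !PySem.Str.isIn ")" stripped) then
          pvLoopB lines f (i + 1) true [line] i blocks
        else pvLoopB lines f (i + 1) false buf bstart (blocks ++ [(i, line)])
    else
      if inml then (blocks ++ [(bstart, PySem.Str.join "\n" buf)], i) else (blocks, i)

def extract_import_blocks_alt (lines : List String) (start_idx : Int) :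
    (List (Int × String)) × Int :=
  pvLoopB lines ((lines.length : Int) - start_idx).toNat start_idx false [] 0 []

-- ===== PRECONDITION & SPEC =====
-- Pre_ excludes start_idx < -len(lines), on which A raises IndexError (negative index out of range).
def Pre_extract_import_blocks (lines : List String) (start_idx : Int) : Prop :=
  -(lines.length : Int) ≤ start_idx
instance (lines : List String) (start_idx : Int) : Decidable (Pre_extract_import_blocks lines start_idx) := by unfold Pre_extract_import_blocks; infer_instance

def pvWitness_extract_import_blocks : List String × Int := (["import os"], 0)

def Spec_extract_import_blocks (lines : List String) (start_idx : Int) (out : (List (Int × String)) × Int) : Prop := out = extract_import_blocks_alt lines start_idx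
instance (lines : List String) (start_idx : Int) (out : (List (Int × String)) × Int) : Decidable (Spec_extract_import_blocks lines start_idx out) := by unfold Spec_extract_import_blocks; infer_instance

-- ===== CLAIM (what is proved, stated in full; the proofs are below) =====
def Claim_equal_extract_import_blocks : Prop := ∀ (lines : List String) (start_idx : Int), Dom_extract_import_blocks lines start_idx → Pre_extract_import_blocks lines start_idx → Spec_extract_import_blocks lines start_idx (extract_import_blocks lines start_idx)

-- ===== LEMMAS AND PROOFS =====

theorem pvInnerA_ge (lines : List String) : ∀ (fuel : Nat) (i : Int) (acc : List String),
    i ≤ (pvInnerA lines fuel i acc).2 := by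
  intro fuel
  induction fuel with
  | zero => intro i acc; simp [pvInnerA]
  | succ f ih =>
      intro i acc
      simp only [pvInnerA]
      split_ifs with h hin
      · simp
      · have := ih (i + 1) (acc ++ [pvGet lines i]); omega
      · simp

theorem pvInnerA_len (lines : List String) : ∀ (fuel : Nat) (i : Int) (acc : List String),
    (pvInnerA lines fuel i acc).2 - ((pvInnerA lines fuel i acc).1.length : Int) =
      i - (acc.length : Int) := by
  intro fuel
  induction fuel with
  | zero => intro i acc; simp [pvInnerA]
  | succ f ih =>
      intro i acc
      simp only [pvInnerA]
      split_ifs with h hin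
      · simp
      · have := ih (i + 1) (acc ++ [pvGet lines i]); simp at this; push_cast; omega
      · simp

-- pvLoopB does not depend on the fuel once the fuel covers the remaining lines
theorem pvLoopB_irrel (lines : List String) : ∀ (f1 f2 : Nat) (i : Int) (inml : Bool)
    (buf : List String) (bstart : Int) (blocks : List (Int × String)),
    ((lines.length : Int) - i).toNat ≤ f1 → ((lines.length : Int) - i).toNat ≤ f2 →
    pvLoopB lines f1 i inml buf bstart blocks = pvLoopB lines f2 i inml buf bstart blocks := by
  intro f1
  induction f1 with
  | zero =>
      intro f2 i inml buf bstart blocks h1 h2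
      have h : ¬ i < (lines.length : Int) := by omega
      cases f2 with
      | zero => rfl
      | succ f2 => simp [pvLoopB, h]
  | succ f1 ih =>
      intro f2 i inml buf bstart blocks h1 h2
      cases f2 with
      | zero =>
          have h : ¬ i < (lines.length : Int) := by omega
          simp [pvLoopB, h]
      | succ f2 =>
          by_cases h : i < (lines.length : Int)
          · simp only [pvLoopB, if_pos h]
            split_ifs <;>
              first
                | rfl
                | exact ih f2 _ _ _ _ _ (by omega) (by omega)
          · simp [pvLoopB, h]

-- B's in_multiline phase consumes exactly what A's inner loop collects
theorem pvLoopB_inml (lines : List String) : ∀ (fuel : Nat) (i : Int) (buf : List String)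
    (bstart : Int) (blocks : List (Int × String)),
    ((lines.length : Int) - i).toNat ≤ fuel → bstart = i - (buf.length : Int) →
    pvLoopB lines fuel i true buf bstart blocks =
      pvLoopB lines ((lines.length : Int) - (pvInnerA lines fuel i buf).2).toNat
        (pvInnerA lines fuel i buf).2 false [] 0
        (blocks ++ [(bstart, PySem.Str.join "\n" (pvInnerA lines fuel i buf).1)]) := by
  intro fuel
  induction fuel with
  | zero =>
      intro i buf bstart blocks hn hb
      have h0 : ((lines.length : Int) - i).toNat = 0 := by omega
      simp [pvInnerA, pvLoopB, h0]
  | succ f ih =>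
      intro i buf bstart blocks hn hb
      by_cases h : i < (lines.length : Int)
      · simp only [pvInnerA, pvLoopB, if_pos h]
        by_cases hin : PySem.Chars.isIn [')'] (pvGet lines i).toList = true
        · simp [hin]
          exact pvLoopB_irrel lines f _ (i + 1) false [] 0 _ (by omega) (by omega)
        · simp [hin]
          exact ih (i + 1) (buf ++ [pvGet lines i]) bstart blocks (by omega)
            (by simp; omega)
      · have h0 : ((lines.length : Int) - i).toNat = 0 := by omega
        simp [pvInnerA, pvLoopB, h, h0]

-- the buffer state is dead while in_multiline is false
theorem pvOuterA_eq_loopB_fuel (lines : List String) : ∀ (fuel : Nat) (i : Int)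
    (buf : List String) (bstart : Int) (blocks : List (Int × String)),
    ((lines.length : Int) - i).toNat ≤ fuel →
    pvOuterA lines fuel i blocks = pvLoopB lines fuel i false buf bstart blocks := by
  intro fuel
  induction fuel with
  | zero => intro i buf bstart blocks hn; simp [pvOuterA, pvLoopB]
  | succ f ih =>
      intro i buf bstart blocks hn
      by_cases h : i < (lines.length : Int)
      · simp only [pvOuterA, pvLoopB, if_pos h]
        by_cases h1 : PySem.Str.strip (pvGet lines i) = ""
        · simp only [h1, if_pos rfl]
          exact ih (i + 1) buf bstart blocks (by omega)
        · simp only [if_neg h1]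
          by_cases h2 : PySem.Str.startswith (PySem.Str.strip (pvGet lines i)) "#" = true
          · simp only [h2, if_true]
            exact ih (i + 1) buf bstart _ (by omega)
          · simp only [if_neg h2]
            by_cases h3 : (!(PySem.Str.startswith (PySem.Str.strip (pvGet lines i)) "import " ||
                PySem.Str.startswith (PySem.Str.strip (pvGet lines i)) "from ")) = true
            · have h3n := h3
              simp at h3n
              simp [h3n.1, h3n.2]
            · simp only [if_neg h3]
              have h3'' := h3
              simp at h3''
              have h3' : PySem.Chars.startswith (PySem.Chars.strip (pvGet lines i).toList)
                    ['i', 'm', 'p', 'o', 'r', 't', ' '] = true ∨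
                  PySem.Chars.startswith (PySem.Chars.strip (pvGet lines i).toList)
                    ['f', 'r', 'o', 'm', ' '] = true := by
                by_cases hi : PySem.Chars.startswith (PySem.Chars.strip (pvGet lines i).toList)
                    ['i', 'm', 'p', 'o', 'r', 't', ' '] = true
                · exact Or.inl hi
                · exact Or.inr (h3'' (by simpa using hi))
              have hA : is_multiline_import_start (pvGet lines i) =
                  (PySem.Str.endswith (PySem.Str.strip (pvGet lines i)) "(" ||
                    (PySem.Str.isIn "(" (PySem.Str.strip (pvGet lines i)) &&
                      !PySem.Str.isIn ")" (PySem.Str.strip (pvGet lines i)))) := by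
                simp [is_multiline_import_start]
                intro _
                exact h3'
              by_cases h4 : (PySem.Str.endswith (PySem.Str.strip (pvGet lines i)) "(" ||
                  (PySem.Str.isIn "(" (PySem.Str.strip (pvGet lines i)) &&
                    !PySem.Str.isIn ")" (PySem.Str.strip (pvGet lines i)))) = true
              · simp only [hA, h4, if_true]
                have hge := pvInnerA_ge lines f (i + 1) [pvGet lines i]
                have hlen := pvInnerA_len lines f (i + 1) [pvGet lines i]
                have hstart : (pvInnerA lines f (i + 1) [pvGet lines i]).2 -
                    ((pvInnerA lines f (i + 1) [pvGet lines i]).1.length : Int) = i := by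
                  simp at hlen; omega
                rw [pvLoopB_inml lines f (i + 1) [pvGet lines i] i blocks (by omega) (by simp)]
                rw [hstart]
                rw [ih (pvInnerA lines f (i + 1) [pvGet lines i]).2 [] 0 _ (by omega)]
                exact pvLoopB_irrel lines f _ _ false [] 0 _ (by omega) (by omega)
              · simp only [hA, if_neg h4]
                exact ih (i + 1) buf bstart _ (by omega)
      · simp [pvOuterA, pvLoopB, h]

-- ===== VERDICT (by name: the statement is the Claim_ definition above) =====
theorem extract_import_blocks_spec : Claim_equal_extract_import_blocks := by
  intro lines start_idx _ _
  unfold Spec_extract_import_blocks extract_import_blocks extract_import_blocks_alt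
  exact pvOuterA_eq_loopB_fuel lines ((lines.length : Int) - start_idx).toNat start_idx [] 0 []
    (le_refl _)
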